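-- pv_equiv track=rewrite | github.com/vinares/Leet | Interview/2022/expedia_oa.py | find
-- ===== SOURCE A (Python) =====
-- from heapq import heapify, heappop, heappushpop, heappush
--
-- def find(n, k, arr):
--     heap = []
--     for i in range(k):
--         heappush(heap, arr[i])
--     ans = [heap[0]]
--     for i in range(k, n):
--         heappushpop(heap, arr[i])
--         ans.append(heap[0])
--     return ans
-- ===== SOURCE B (Python) =====
-- def _insert_sorted(s, x):
--     # insert x into the ascending list s, after any equal elements (hand-rolled bisect_right)
--     lo, hi = 0, len(s)
--     while lo < hi:
--         mid = (lo + hi) // 2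
--         if s[mid] <= x:
--             lo = mid + 1
--         else:
--             hi = mid
--     s.insert(lo, x)
--
-- def find(n, k, arr):
--     s = sorted(arr[:k])
--     ans = [s[len(s) - k]]
--     for i in range(k, n):
--         _insert_sorted(s, arr[i])
--         ans.append(s[len(s) - k])
--     return ans
-- ===== Notes on version B (the rewrite author's own statement) =====
-- stated objective: alternative
-- what changed: Replaces the size-k min-heap (heapq push/pushpop, heap-order invariant) by the full prefix kept as one ascending list via hand-rolled bisect_right insertion, reading the k-th largest by position s[len(s)-k].
import Mathlib
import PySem

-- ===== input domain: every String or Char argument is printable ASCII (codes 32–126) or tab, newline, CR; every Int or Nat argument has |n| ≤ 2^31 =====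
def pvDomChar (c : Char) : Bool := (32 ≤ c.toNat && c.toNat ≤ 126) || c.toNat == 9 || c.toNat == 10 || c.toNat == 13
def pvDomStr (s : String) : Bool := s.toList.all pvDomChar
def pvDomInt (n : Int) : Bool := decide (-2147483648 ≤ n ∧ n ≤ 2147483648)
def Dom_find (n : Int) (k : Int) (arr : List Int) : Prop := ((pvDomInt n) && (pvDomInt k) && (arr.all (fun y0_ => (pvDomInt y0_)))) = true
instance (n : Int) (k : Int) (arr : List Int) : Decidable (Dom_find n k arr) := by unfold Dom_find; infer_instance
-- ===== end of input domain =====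

-- B replaces A's size-k min-heap by the whole prefix kept as an ascending sorted list,
-- reading the k-th largest at position len(s)-k; equivalence of return values is proved on Pre_find.

-- ===== PORT A =====
-- CPython heapq transliterated. Heap positions are internally generated non-negative indices,
-- carried as Nat; every heap access below is in range, so List.getD is exact for heap[p].
-- _siftdown's initial 'heap[pos] = newitem' write is folded into its final write: the loop
-- never reads heap[pos], so the arrays coincide step for step.
-- fuel is a pure termination device: the loop moves pos to (pos-1)/2, so pos+1 steps suffice
def siftdownGo : Nat → List Int → Int → Nat → Nat → List Int
  | 0, heap, newitem, _, pos => heap.set pos newitem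
  | fuel + 1, heap, newitem, startpos, pos =>
    if startpos < pos then
      let parentpos := (pos - 1) / 2
      let parent := heap.getD parentpos 0
      if newitem < parent then siftdownGo fuel (heap.set pos parent) newitem startpos parentpos
      else heap.set pos newitem
    else heap.set pos newitem

def siftdownA (heap : List Int) (newitem : Int) (startpos pos : Nat) : List Int :=
  siftdownGo (pos + 1) heap newitem startpos pos

-- rightpos = childpos + 1 is inlined (2*pos+2); fuel again only for termination
def siftupGo : Nat → List Int → Int → Nat → Nat → List Int
  | 0, heap, newitem, startpos, pos => siftdownA heap newitem startpos pos
  | fuel + 1, heap, newitem, startpos, pos =>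
    if 2 * pos + 1 < heap.length then
      let childpos :=
        if 2 * pos + 2 < heap.length ∧ ¬ heap.getD (2 * pos + 1) 0 < heap.getD (2 * pos + 2) 0
        then 2 * pos + 2 else 2 * pos + 1
      siftupGo fuel (heap.set pos (heap.getD childpos 0)) newitem startpos childpos
    else siftdownA heap newitem startpos pos

def siftupA (heap : List Int) (newitem : Int) (startpos pos : Nat) : List Int :=
  siftupGo (heap.length - pos + 1) heap newitem startpos pos

def heappushA (heap : List Int) (item : Int) : List Int :=
  siftdownA (heap ++ [item]) item 0 heap.length

-- returns (new heap, popped item); the call site in find discards the popped item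
def heappushpopA (heap : List Int) (item : Int) : List Int × Int :=
  if heap ≠ [] ∧ heap.getD 0 0 < item then
    (siftupA (heap.set 0 item) item 0 0, heap.getD 0 0)
  else (heap, item)

def find (n : Int) (k : Int) (arr : List Int) : List Int :=
  let heap := (PySem.List.pyRange 0 k 1).foldl
    (fun h i => heappushA h (PySem.List.pyGetD arr i 0)) []
  let st := (PySem.List.pyRange k n 1).foldl
    (fun (st : List Int × List Int) i =>
      let r := heappushpopA st.1 (PySem.List.pyGetD arr i 0)
      (r.1, st.2 ++ [PySem.List.pyGetD r.1 0 0]))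
    (heap, [PySem.List.pyGetD heap 0 0])
  st.2

-- ===== PORT B =====
-- the binary-search loop of _insert_sorted (hand-rolled bisect_right); fuel is a pure
-- termination device (hi - lo shrinks every step, so len(s)+1 steps more than suffice)
def bsGo : Nat → List Int → Int → Nat → Nat → Nat
  | 0, _, _, lo, _ => lo
  | fuel + 1, s, x, lo, hi =>
    if lo < hi then
      let mid := (lo + hi) / 2
      if s.getD mid 0 ≤ x then bsGo fuel s x (mid + 1) hi else bsGo fuel s x lo mid
    else lo

def insIdxB (s : List Int) (x : Int) : Nat := bsGo (s.length + 1) s x 0 s.length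

-- s.insert(lo, x): _insert_sorted mutates its local list; the caller observes only the value
def insSortedB (s : List Int) (x : Int) : List Int :=
  PySem.List.insert s ((insIdxB s x : Nat) : Int) x

def find_alt (n : Int) (k : Int) (arr : List Int) : List Int :=
  let s := PySem.List.sorted (PySem.List.slice arr (some 0) (some k)) (fun x => x) false
  let st := (PySem.List.pyRange k n 1).foldl
    (fun (st : List Int × List Int) i =>
      let s' := insSortedB st.1 (PySem.List.pyGetD arr i 0)
      (s', st.2 ++ [PySem.List.pyGetD s' ((s'.length : Int) - k) 0]))
    (s, [PySem.List.pyGetD s ((s.length : Int) - k) 0])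
  st.2

-- ===== PRECONDITION & SPEC =====
-- A raises IndexError exactly when k < 1 (heap[0] on the empty heap), k > len(arr) or
-- n > len(arr) (arr[i] out of range); Pre_find excludes exactly those inputs.
def Pre_find (n : Int) (k : Int) (arr : List Int) : Prop :=
  1 ≤ k ∧ k ≤ (arr.length : Int) ∧ n ≤ (arr.length : Int)
instance (n : Int) (k : Int) (arr : List Int) : Decidable (Pre_find n k arr) := by
  unfold Pre_find; infer_instance

def pvWitness_find : Int × Int × List Int := (3, 2, [5, 1, 4])

def Spec_find (n : Int) (k : Int) (arr : List Int) (out : List Int) : Prop := out = find_alt n k arr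
instance (n : Int) (k : Int) (arr : List Int) (out : List Int) : Decidable (Spec_find n k arr out) := by unfold Spec_find; infer_instance

-- ===== CLAIM (what is proved, stated in full; the proofs are below) =====
def Claim_equal_find : Prop := ∀ (n : Int) (k : Int) (arr : List Int), Dom_find n k arr → Pre_find n k arr → Spec_find n k arr (find n k arr)

-- ===== LEMMAS AND PROOFS =====

-- abbreviation used only by the proofs
def sortId (l : List Int) : List Int := PySem.List.sorted l (fun x => x) false

def SortedLe (l : List Int) : Prop := l.Pairwise (fun a b => a ≤ b)

def IsHeap (h : List Int) : Prop :=
  ∀ j : Nat, 0 < j → j < h.length → h.getD ((j - 1) / 2) 0 ≤ h.getD j 0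

-- getD / set bookkeeping ----------------------------------------------------

theorem getD_set (l : List Int) (i j : Nat) (a : Int) :
    (l.set i a).getD j 0 = if j = i ∧ i < l.length then a else l.getD j 0 := by
  simp only [List.getD, List.getElem?_set]
  split_ifs with h1 h2 h3 h4 <;> simp_all

theorem getD_eq_getElem' (l : List Int) (i : Nat) (h : i < l.length) :
    l.getD i 0 = l[i] := by
  simp [List.getD, List.getElem?_eq_getElem h]

theorem cons_set_perm (l : List Int) (j : Nat) (a b : Int) (hj : j < l.length) :
    (a :: l.set j b).Perm (b :: l.set j a) := by
  induction l generalizing j with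
  | nil => simp at hj
  | cons y t ih =>
    cases j with
    | zero => simpa using List.Perm.swap b a t
    | succ m =>
      simp only [List.set_cons_succ]
      have h1 : (a :: t.set m b).Perm (b :: t.set m a) := ih m (by simpa using hj)
      exact ((List.Perm.swap y a _).trans (h1.cons y)).trans (List.Perm.swap b y _)

theorem set_set_perm (l : List Int) (i j : Nat) (a b : Int)
    (hi : i < l.length) (hj : j < l.length) (hij : i ≠ j) :
    ((l.set i a).set j b).Perm ((l.set i b).set j a) := by
  induction l generalizing i j with
  | nil => simp at hi
  | cons y t ih =>
    cases i with
    | zero =>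
      cases j with
      | zero => omega
      | succ m =>
        simp only [List.set_cons_zero, List.set_cons_succ]
        exact cons_set_perm t m a b (by simpa using hj)
    | succ p =>
      cases j with
      | zero =>
        simp only [List.set_cons_zero, List.set_cons_succ]
        exact cons_set_perm t p b a (by simpa using hi)
      | succ m =>
        simp only [List.set_cons_succ]
        exact (ih p m (by simpa using hi) (by simpa using hj) (by omega)).cons y

theorem set_getD_self (l : List Int) (i : Nat) (h : i < l.length) :
    l.set i (l.getD i 0) = l := by
  rw [getD_eq_getElem' l i h]; exact List.set_getElem_self ..

-- permutation facts for the sift routines -----------------------------------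

theorem sdgo_perm (fuel : Nat) : ∀ (pos : Nat) (heap : List Int) (v : Int) (s : Nat),
    pos < fuel → pos < heap.length → (siftdownGo fuel heap v s pos).Perm (heap.set pos v) := by
  induction fuel with
  | zero => intro pos _ _ _ hf; omega
  | succ fuel ih =>
    intro pos heap v s hf h
    simp only [siftdownGo]
    split
    · rename_i hsp
      split
      · rename_i hlt
        have hpp : (pos - 1) / 2 < pos := Nat.lt_of_le_of_lt (Nat.div_le_self _ _) (by omega)
        have hpplen : (pos - 1) / 2 < heap.length := lt_trans hpp h
        have ihh := ih ((pos - 1) / 2) (heap.set pos (heap.getD ((pos - 1) / 2) 0)) v s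
          (by omega) (by simpa using hpplen)
        refine ihh.trans ?_
        refine (set_set_perm heap pos ((pos - 1) / 2) (heap.getD ((pos - 1) / 2) 0) v h hpplen
          (by omega)).trans ?_
        have heq : (heap.set pos v).getD ((pos - 1) / 2) 0 = heap.getD ((pos - 1) / 2) 0 := by
          rw [getD_set]
          simp [show ¬ ((pos - 1) / 2 = pos ∧ pos < heap.length) from by omega]
        rw [← heq, set_getD_self _ _ (by simpa using hpplen)]
      · exact List.Perm.refl _
    · exact List.Perm.refl _

theorem sd_perm (pos : Nat) (heap : List Int) (v : Int) (s : Nat) (h : pos < heap.length) :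
    (siftdownA heap v s pos).Perm (heap.set pos v) :=
  sdgo_perm (pos + 1) pos heap v s (Nat.lt_succ_self pos) h

theorem sugo_perm (fuel : Nat) : ∀ (pos : Nat) (heap : List Int) (v : Int) (s : Nat),
    heap.length - pos < fuel → pos < heap.length → (siftupGo fuel heap v s pos).Perm (heap.set pos v) := by
  induction fuel with
  | zero => intro pos _ _ _ hf; omega
  | succ fuel ih =>
    intro pos heap v s hf h
    simp only [siftupGo]
    split
    · rename_i hchild
      set cp := if 2 * pos + 2 < heap.length ∧ ¬ heap.getD (2 * pos + 1) 0 < heap.getD (2 * pos + 2) 0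
        then 2 * pos + 2 else 2 * pos + 1 with hcp
      have hcplt : cp < heap.length := by rw [hcp]; split <;> omega
      have hcpgt : pos < cp := by rw [hcp]; split <;> omega
      have ihh := ih cp (heap.set pos (heap.getD cp 0)) v s
        (by simp only [List.length_set]; omega) (by simpa using hcplt)
      refine ihh.trans ?_
      refine (set_set_perm heap pos cp (heap.getD cp 0) v h hcplt (by omega)).trans ?_
      have heq : (heap.set pos v).getD cp 0 = heap.getD cp 0 := by
        rw [getD_set]
        simp [show ¬ (cp = pos ∧ pos < heap.length) from by omega]
      rw [← heq, set_getD_self _ _ (by simpa using hcplt)]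
    · exact sd_perm pos heap v s h

theorem su_perm (pos : Nat) (heap : List Int) (v : Int) (s : Nat) (h : pos < heap.length) :
    (siftupA heap v s pos).Perm (heap.set pos v) :=
  sugo_perm (heap.length - pos + 1) pos heap v s (by omega) h

-- heap-property preservation ------------------------------------------------

theorem root_min (h : List Int) (hh : IsHeap h) :
    ∀ j : Nat, j < h.length → h.getD 0 0 ≤ h.getD j 0 := by
  intro j
  induction j using Nat.strong_induction_on with
  | _ j ih =>
    intro hj
    rcases Nat.eq_zero_or_pos j with h0 | h0
    · subst h0; exact le_refl _
    · have hp : (j - 1) / 2 < j := Nat.lt_of_le_of_lt (Nat.div_le_self _ _) (by omega)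
      exact le_trans (ih _ hp (lt_trans hp hj)) (hh j h0 hj)

theorem sdgo_heap (fuel : Nat) : ∀ (pos : Nat) (heap : List Int) (v : Int),
    pos < fuel → pos < heap.length →
    (∀ j : Nat, 0 < j → j < heap.length → j ≠ pos →
      (heap.set pos v).getD ((j - 1) / 2) 0 ≤ (heap.set pos v).getD j 0) →
    (∀ c : Nat, c < heap.length → (c - 1) / 2 = pos → 0 < pos →
      (heap.set pos v).getD ((pos - 1) / 2) 0 ≤ (heap.set pos v).getD c 0) →
    IsHeap (siftdownGo fuel heap v 0 pos) := by
  induction fuel with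
  | zero => intro pos _ _ hf; omega
  | succ fuel ih =>
    intro pos heap v hf hlen HA HG
    have hgval : ∀ t : Nat, (heap.set pos v).getD t 0 = if t = pos then v else heap.getD t 0 := by
      intro t; rw [getD_set]; split_ifs <;> first | rfl | omega
    simp only [siftdownGo]
    split
    · rename_i hsp
      split
      · rename_i hlt
        have hpplt : (pos - 1) / 2 < pos := Nat.lt_of_le_of_lt (Nat.div_le_self _ _) (by omega)
        have hpplen : (pos - 1) / 2 < heap.length := lt_trans hpplt hlen
        have hval : ∀ t : Nat,
            ((heap.set pos (heap.getD ((pos - 1) / 2) 0)).set ((pos - 1) / 2) v).getD t 0 =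
            if t = (pos - 1) / 2 then v
            else if t = pos then heap.getD ((pos - 1) / 2) 0 else heap.getD t 0 := by
          intro t
          rw [getD_set, getD_set]
          simp only [List.length_set]
          split_ifs <;> first | rfl | omega
        apply ih ((pos - 1) / 2) (heap.set pos (heap.getD ((pos - 1) / 2) 0)) v (by omega)
          (by simpa using hpplen)
        · -- HA for the recursive call
          intro j hj0 hjl hjne
          simp only [List.length_set] at hjl
          rw [hval, hval]
          by_cases hjpos : j = pos
          · subst hjpos
            rw [if_pos rfl, if_neg (by omega), if_pos rfl]
            omega
          · by_cases hpj : (j - 1) / 2 = pos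
            · rw [if_neg (by omega), if_pos hpj, if_neg hjne, if_neg hjpos]
              have h1 := HG j hjl hpj hsp
              rw [hgval, hgval] at h1
              rw [if_neg (by omega), if_neg hjpos] at h1
              exact h1
            · by_cases hpjpp : (j - 1) / 2 = (pos - 1) / 2
              · rw [if_pos hpjpp, if_neg hjne, if_neg hjpos]
                have h1 := HA j hj0 hjl hjpos
                rw [hgval, hgval] at h1
                rw [hpjpp, if_neg (by omega), if_neg hjpos] at h1
                omega
              · rw [if_neg hpjpp, if_neg hpj, if_neg hjne, if_neg hjpos]
                have h1 := HA j hj0 hjl hjpos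
                rw [hgval, hgval] at h1
                rw [if_neg hpj, if_neg hjpos] at h1
                exact h1
        · -- HG for the recursive call
          intro cc hcl hcpar hpp0
          simp only [List.length_set] at hcl
          rw [hval, hval]
          have hub : (pos - 1) / 2 - 1 ≥ 0 := by omega
          have hgrand_lt : ((pos - 1) / 2 - 1) / 2 < (pos - 1) / 2 :=
            Nat.lt_of_le_of_lt (Nat.div_le_self _ _) (by omega)
          have hApp := HA ((pos - 1) / 2) hpp0 hpplen (by omega)
          rw [hgval, hgval] at hApp
          rw [if_neg (by omega), if_neg (by omega)] at hApp
          rw [if_neg (by omega), if_neg (by omega)]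
          by_cases hcpos : cc = pos
          · subst hcpos
            rw [if_neg (by omega), if_pos rfl]
            exact hApp
          · rw [if_neg (by omega), if_neg hcpos]
            have h1 := HA cc (by omega) hcl hcpos
            rw [hgval, hgval] at h1
            rw [hcpar, if_neg (by omega), if_neg hcpos] at h1
            omega
      · -- stop: parent ≤ v, result heap.set pos v
        rename_i hnlt
        intro j hj0 hjl
        simp only [List.length_set] at hjl
        by_cases hje : j = pos
        · subst hje
          rw [hgval, hgval, if_neg (by omega), if_pos rfl]
          omega
        · exact HA j hj0 hjl hje
    · -- pos = 0 (startpos = 0)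
      rename_i hsp
      intro j hj0 hjl
      simp only [List.length_set] at hjl
      exact HA j hj0 hjl (by omega)


theorem sd_heap : ∀ (pos : Nat) (heap : List Int) (v : Int),
    pos < heap.length →
    (∀ j : Nat, 0 < j → j < heap.length → j ≠ pos →
      (heap.set pos v).getD ((j - 1) / 2) 0 ≤ (heap.set pos v).getD j 0) →
    (∀ c : Nat, c < heap.length → (c - 1) / 2 = pos → 0 < pos →
      (heap.set pos v).getD ((pos - 1) / 2) 0 ≤ (heap.set pos v).getD c 0) →
    IsHeap (siftdownA heap v 0 pos) :=
  fun pos heap v h HA HG => sdgo_heap (pos + 1) pos heap v (Nat.lt_succ_self pos) h HA HG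

theorem sugo_heap (fuel : Nat) : ∀ (pos : Nat) (heap : List Int) (v : Int),
    heap.length - pos < fuel → pos < heap.length →
    (∀ j : Nat, 0 < j → j < heap.length → j ≠ pos → (j - 1) / 2 ≠ pos →
      heap.getD ((j - 1) / 2) 0 ≤ heap.getD j 0) →
    (∀ c : Nat, c < heap.length → (c - 1) / 2 = pos → 0 < pos →
      heap.getD ((pos - 1) / 2) 0 ≤ heap.getD c 0) →
    IsHeap (siftupGo fuel heap v 0 pos) := by
  induction fuel with
  | zero => intro pos _ _ hf; omega
  | succ fuel ih =>
    intro pos heap v hf hlen SI GI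
    simp only [siftupGo]
    split
    · rename_i hchild
      set cp := if 2 * pos + 2 < heap.length ∧ ¬ heap.getD (2 * pos + 1) 0 < heap.getD (2 * pos + 2) 0
        then 2 * pos + 2 else 2 * pos + 1 with hcp
      have hcplt : cp < heap.length := by rw [hcp]; split <;> omega
      have hcpgt : pos < cp := by rw [hcp]; split <;> omega
      have hcppar : (cp - 1) / 2 = pos := by rw [hcp]; split <;> omega
      have hmin : ∀ j : Nat, 0 < j → j < heap.length → (j - 1) / 2 = pos → j ≠ cp →
          heap.getD cp 0 ≤ heap.getD j 0 := by
        intro j hj0 hjlen hjpar hjne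
        have hjmem : j = 2 * pos + 1 ∨ j = 2 * pos + 2 := by omega
        rw [hcp]
        split
        · rename_i hco
          have : j = 2 * pos + 1 := by
            rcases hjmem with h | h
            · exact h
            · exfalso; apply hjne; rw [hcp, if_pos hco]; omega
          rw [this]; omega
        · rename_i hco
          have hj2 : j = 2 * pos + 2 := by
            rcases hjmem with h | h
            · exfalso; apply hjne; rw [hcp, if_neg hco]; omega
            · exact h
          subst hj2
          rcases Decidable.not_and_iff_not_or_not.mp hco with h | h
          · omega
          · have := Decidable.not_not.mp h
            omega
      have hval : ∀ t : Nat, (heap.set pos (heap.getD cp 0)).getD t 0 =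
          if t = pos then heap.getD cp 0 else heap.getD t 0 := by
        intro t; rw [getD_set]; split_ifs <;> first | rfl | omega
      apply ih cp (heap.set pos (heap.getD cp 0)) v (by simp only [List.length_set]; omega)
        (by simpa using hcplt)
      · -- SI for the recursive call
        intro j hj0 hjl hjne hpne
        simp only [List.length_set] at hjl
        rw [hval, hval]
        by_cases hjpos : j = pos
        · subst hjpos
          rw [if_neg (by omega), if_pos rfl]
          have := GI cp hcplt hcppar (by omega)
          exact this
        · rw [if_neg hjpos]
          by_cases hpjpos : (j - 1) / 2 = pos
          · rw [if_pos hpjpos]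
            exact hmin j hj0 hjl hpjpos hjne
          · rw [if_neg hpjpos]
            exact SI j hj0 hjl hjpos hpjpos
      · -- GI for the recursive call
        intro cc hcl hcpar hcp0
        simp only [List.length_set] at hcl
        rw [hval, hval, hcppar]
        have hccgt : cp < cc := by omega
        rw [if_pos rfl, if_neg (by omega)]
        have h2 := SI cc (by omega) hcl (by omega) (by omega)
        rw [hcpar] at h2
        exact h2
    · -- leaf: finish with siftdown
      rename_i hchild
      apply sd_heap pos heap v hlen
      · intro j hj0 hjl hjne
        have hgval : ∀ t : Nat, (heap.set pos v).getD t 0 = if t = pos then v else heap.getD t 0 := by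
          intro t; rw [getD_set]; split_ifs <;> first | rfl | omega
        rw [hgval, hgval, if_neg hjne]
        have hpjpos : (j - 1) / 2 ≠ pos := by omega
        rw [if_neg hpjpos]
        exact SI j hj0 hjl hjne hpjpos
      · intro cc hcl hcpar hpos0
        exfalso; omega


theorem su_heap : ∀ (pos : Nat) (heap : List Int) (v : Int),
    pos < heap.length →
    (∀ j : Nat, 0 < j → j < heap.length → j ≠ pos → (j - 1) / 2 ≠ pos →
      heap.getD ((j - 1) / 2) 0 ≤ heap.getD j 0) →
    (∀ c : Nat, c < heap.length → (c - 1) / 2 = pos → 0 < pos →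
      heap.getD ((pos - 1) / 2) 0 ≤ heap.getD c 0) →
    IsHeap (siftupA heap v 0 pos) :=
  fun pos heap v h SI GI => sugo_heap (heap.length - pos + 1) pos heap v (by omega) h SI GI

-- heappush / heappushpop ----------------------------------------------------

theorem set_append_len (l : List Int) (a b : Int) :
    (l ++ [a]).set l.length b = l ++ [b] := by
  induction l with
  | nil => rfl
  | cons y t ih => simp [ih]

theorem push_perm (h : List Int) (x : Int) : (heappushA h x).Perm (x :: h) := by
  unfold heappushA
  have := sd_perm h.length (h ++ [x]) x 0 (by simp)
  rw [set_append_len] at this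
  exact this.trans (List.perm_append_singleton x h)

theorem push_heap (h : List Int) (x : Int) (hh : IsHeap h) : IsHeap (heappushA h x) := by
  unfold heappushA
  apply sd_heap h.length (h ++ [x]) x (by simp)
  · intro j hj0 hjl hjne
    rw [set_append_len]
    have hjlen : j < h.length := by simp at hjl; omega
    have hplen : (j - 1) / 2 < h.length :=
      Nat.lt_of_le_of_lt (Nat.le_trans (Nat.div_le_self _ _) (by omega)) hjlen
    rw [getD_eq_getElem' _ _ (by simp; omega), getD_eq_getElem' _ _ (by simp; omega)]
    rw [List.getElem_append_left hplen, List.getElem_append_left hjlen]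
    rw [← getD_eq_getElem' _ _ hplen, ← getD_eq_getElem' _ _ hjlen]
    exact hh j hj0 hjlen
  · intro c hc hpc hpos
    exfalso
    simp at hc
    omega

theorem pushpop_heap (h : List Int) (x : Int) (hh : IsHeap h) :
    IsHeap ((heappushpopA h x).1) := by
  unfold heappushpopA
  split
  · rename_i hcond
    have hne : h ≠ [] := hcond.1
    have hlen : 0 < h.length := List.length_pos_iff.mpr hne
    apply su_heap 0 (h.set 0 x) x (by simpa using hlen)
    · intro j hj0 hjl hjne hpne
      simp only [List.length_set] at hjl
      rw [getD_set, getD_set]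
      simp only [if_neg (by omega : ¬ ((j-1)/2 = 0 ∧ 0 < h.length)),
        if_neg (by omega : ¬ (j = 0 ∧ 0 < h.length))]
      exact hh j hj0 hjl
    · intro c hc hpc hpos; omega
  · exact hh

-- insertion-sort side -------------------------------------------------------

theorem pairwise_getD (l : List Int) (hl : SortedLe l) (i j : Nat)
    (hij : i ≤ j) (hj : j < l.length) : l.getD i 0 ≤ l.getD j 0 := by
  rcases Nat.lt_or_ge i j with h | h
  · rw [getD_eq_getElem' _ _ (lt_trans h hj), getD_eq_getElem' _ _ hj]
    exact List.pairwise_iff_getElem.mp hl i j _ hj h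
  · have : i = j := by omega
    subst this; exact le_refl _

theorem bsGo_le (s : List Int) (x : Int) : ∀ (fuel lo hi : Nat), lo ≤ hi → bsGo fuel s x lo hi ≤ hi := by
  intro fuel
  induction fuel with
  | zero => intro lo hi h; simpa [bsGo] using h
  | succ f ih =>
    intro lo hi h
    simp only [bsGo]
    split
    · rename_i hlh
      split
      · exact ih ((lo + hi) / 2 + 1) hi (by omega)
      · exact le_trans (ih lo ((lo + hi) / 2) (by omega)) (by omega)
    · exact h

theorem insIdx_le (s : List Int) (x : Int) : insIdxB s x ≤ s.length :=
  bsGo_le s x (s.length + 1) 0 s.length (by omega)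

theorem bsGo_inv (s : List Int) (x : Int) (hs : SortedLe s) : ∀ (fuel lo hi : Nat),
    hi - lo < fuel → hi ≤ s.length →
    (∀ t, t < lo → s.getD t 0 ≤ x) →
    (∀ t, hi ≤ t → t < s.length → ¬ s.getD t 0 ≤ x) →
    (∀ t, t < bsGo fuel s x lo hi → s.getD t 0 ≤ x) ∧
    (∀ t, bsGo fuel s x lo hi ≤ t → t < s.length → ¬ s.getD t 0 ≤ x) := by
  intro fuel
  induction fuel with
  | zero => intro lo hi hf; omega
  | succ f ih =>
    intro lo hi hf hhi Hlo Hhi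
    simp only [bsGo]
    split
    · rename_i hlh
      split
      · rename_i hm
        apply ih ((lo + hi) / 2 + 1) hi (by omega) hhi ?_ Hhi
        intro t ht
        exact le_trans (pairwise_getD s hs t ((lo + hi) / 2) (by omega) (by omega)) hm
      · rename_i hm
        apply ih lo ((lo + hi) / 2) (by omega) (by omega) Hlo ?_
        intro t hmt htl hc
        exact hm (le_trans (pairwise_getD s hs ((lo + hi) / 2) t hmt htl) hc)
    · rename_i hlh
      exact ⟨Hlo, fun t ht htl => Hhi t (by omega) htl⟩

theorem insIdx_mem_le (s : List Int) (x : Int) (hs : SortedLe s) :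
    ∀ t, t < insIdxB s x → s.getD t 0 ≤ x :=
  (bsGo_inv s x hs (s.length + 1) 0 s.length (by omega) (le_refl _)
    (fun t ht => absurd ht (by omega)) (fun t ht htl => absurd htl (by omega))).1

theorem insIdx_stop (s : List Int) (x : Int) (hs : SortedLe s) :
    insIdxB s x < s.length → ¬ s.getD (insIdxB s x) 0 ≤ x :=
  fun h => (bsGo_inv s x hs (s.length + 1) 0 s.length (by omega) (le_refl _)
    (fun t ht => absurd ht (by omega)) (fun t ht htl => absurd htl (by omega))).2
    (insIdxB s x) (le_refl _) h

theorem insSorted_eq (s : List Int) (x : Int) :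
    insSortedB s x = s.take (insIdxB s x) ++ [x] ++ s.drop (insIdxB s x) := by
  unfold insSortedB
  rw [PySem.List.insert_natCast s (insIdxB s x) x (insIdx_le s x)]
  rw [List.append_assoc, List.singleton_append]

theorem drop_getD_cons (l : List Int) (j : Nat) (hj : j < l.length) :
    l.drop j = l.getD j 0 :: l.drop (j + 1) := by
  rw [getD_eq_getElem' _ _ hj]
  exact List.drop_eq_getElem_cons hj

theorem ins_perm (s : List Int) (x : Int) : (insSortedB s x).Perm (x :: s) := by
  rw [insSorted_eq]
  simp only [List.append_assoc, List.singleton_append]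
  exact (List.perm_middle).trans (by rw [List.take_append_drop])

theorem ins_sorted (s : List Int) (x : Int) (hs : SortedLe s) : SortedLe (insSortedB s x) := by
  rw [insSorted_eq]
  unfold SortedLe
  have hcle : insIdxB s x ≤ s.length := insIdx_le s x
  have h_take_le : ∀ a ∈ s.take (insIdxB s x), a ≤ x := by
    intro a ha
    obtain ⟨t, htlt, rfl⟩ := List.getElem_of_mem ha
    have htc : t < insIdxB s x := by
      have := htlt; simp [List.length_take] at this; omega
    rw [List.getElem_take, ← getD_eq_getElem' _ _ (by omega)]
    exact insIdx_mem_le s x hs t htc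
  have h_drop_ge : ∀ b ∈ s.drop (insIdxB s x), x ≤ b := by
    intro b hb
    obtain ⟨u, hult, rfl⟩ := List.getElem_of_mem hb
    have hulen : insIdxB s x + u < s.length := by
      have := hult; simp [List.length_drop] at this; omega
    have hclt : insIdxB s x < s.length := by omega
    have hstop := insIdx_stop s x hs hclt
    have hmono := pairwise_getD s hs (insIdxB s x) (insIdxB s x + u) (by omega) hulen
    rw [List.getElem_drop, ← getD_eq_getElem' _ _ hulen]
    omega
  rw [List.append_assoc, List.singleton_append, List.pairwise_append]
  refine ⟨List.Pairwise.sublist (List.take_sublist _ _) hs, ?_, ?_⟩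
  · rw [List.pairwise_cons]
    exact ⟨h_drop_ge, List.Pairwise.sublist (List.drop_sublist _ _) hs⟩
  · intro a ha b hb
    rcases List.mem_cons.mp hb with rfl | hb'
    · exact h_take_le a ha
    · exact le_trans (h_take_le a ha) (h_drop_ge b hb')

theorem ins_length (s : List Int) (x : Int) : (insSortedB s x).length = s.length + 1 := by
  have := (ins_perm s x).length_eq
  simpa using this

theorem step_drop_perm (s : List Int) (x : Int) (j : Nat) (hs : SortedLe s) (hj : j < s.length) :
    ((insSortedB s x).drop (j + 1)).Perm
      (if s.getD j 0 < x then x :: s.drop (j + 1) else s.drop j) := by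
  rw [insSorted_eq]
  have hcle : insIdxB s x ≤ s.length := insIdx_le s x
  set c := insIdxB s x with hc
  by_cases hcj : c ≤ j
  case pos =>
    -- c ≤ j : the inserted element sits below position j+1, top part unchanged
    have hclt : c < s.length := by omega
    have hstop := insIdx_stop s x hs (hc ▸ hclt)
    have hcond : ¬ s.getD j 0 < x := by
      have := pairwise_getD s hs c j hcj hj
      rw [← hc] at hstop
      omega
    rw [if_neg hcond, List.drop_append, List.drop_append]
    have hlt : (s.take c).length = c := by simp [List.length_take]; omega
    rw [List.drop_eq_nil_of_le (by omega : (s.take c).length ≤ j + 1)]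
    rw [List.drop_eq_nil_of_le (by simp [hlt]; omega : [x].length ≤ j + 1 - (s.take c).length)]
    rw [List.drop_drop]
    simp only [List.nil_append, List.length_append, hlt, List.length_cons, List.length_nil]
    have harith : c + (j + 1 - (c + 1)) = j := by omega
    rw [harith]
  case neg =>
    -- j < c : x is inserted among the first c elements
    have hjc : j < c := by omega
    have hjle : s.getD j 0 ≤ x := insIdx_mem_le s x hs j (hc ▸ hjc)
    have hlt : (s.take c).length = c := by simp [List.length_take]; omega
    rw [List.drop_append, List.drop_append]
    have hx0 : [x].drop (j + 1 - (s.take c).length) = [x] := by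
      rw [hlt, (by omega : j + 1 - c = 0)]; rfl
    have hd0 : (s.drop c).drop (j + 1 - (s.take c ++ [x]).length) = s.drop c := by
      rw [(by simp [hlt]; omega : j + 1 - (s.take c ++ [x]).length = 0)]; rfl
    rw [hx0, hd0]
    have hkey : (s.take c).drop (j + 1) ++ s.drop c = s.drop (j + 1) := by
      have h3 : (s.take c).drop (j + 1) = (s.drop (j + 1)).take (c - (j + 1)) := List.drop_take
      have h4 : s.drop c = (s.drop (j + 1)).drop (c - (j + 1)) := by
        rw [List.drop_drop]; congr 1; omega
      rw [h3, h4, List.take_append_drop]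
    have hperm : (((s.take c).drop (j + 1) ++ [x]) ++ s.drop c).Perm (x :: s.drop (j + 1)) := by
      rw [List.append_assoc, List.singleton_append]
      exact List.perm_middle.trans (by rw [hkey])
    by_cases hcond : s.getD j 0 < x
    · rw [if_pos hcond]; exact hperm
    · rw [if_neg hcond]
      have heq : s.getD j 0 = x := by omega
      rw [drop_getD_cons s j hj, heq]
      exact hperm

theorem heap_head_eq (h s : List Int) (j : Nat) (hh : IsHeap h)
    (hp : h.Perm (s.drop j)) (hs : SortedLe s) (hj : j < s.length) :
    h.getD 0 0 = s.getD j 0 := by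
  have hlen : h.length = s.length - j := by simpa using hp.length_eq
  have hpos : 0 < h.length := by omega
  have hmem0 : h.getD 0 0 ∈ s.drop j := by
    refine hp.mem_iff.mp ?_
    rw [getD_eq_getElem' _ _ hpos]; exact List.getElem_mem hpos
  have hmemj : s.getD j 0 ∈ h := by
    refine hp.mem_iff.mpr ?_
    rw [drop_getD_cons s j hj]; exact List.mem_cons_self ..
  -- h.getD 0 0 ≤ s.getD j 0 via root_min
  obtain ⟨t, ht, hteq⟩ := List.getElem_of_mem hmemj
  have h1 : h.getD 0 0 ≤ s.getD j 0 := by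
    rw [← hteq, ← getD_eq_getElem' _ _ ht]; exact root_min h hh t ht
  -- reverse: every element of s.drop j is ≥ s.getD j 0
  obtain ⟨u, hu, hueq⟩ := List.getElem_of_mem hmem0
  have h2 : s.getD j 0 ≤ h.getD 0 0 := by
    rw [← hueq, List.getElem_drop]
    rw [← getD_eq_getElem' _ _ (by simp at hu; omega)]
    exact pairwise_getD s hs j (j + u) (by omega) (by simp at hu; omega)
  omega

-- initial heap construction -------------------------------------------------

theorem pushfold (xs : List Int) : ∀ h, IsHeap h →
    IsHeap (xs.foldl heappushA h) ∧ (xs.foldl heappushA h).Perm (xs ++ h) := by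
  induction xs with
  | nil => intro h hh; exact ⟨hh, by simp⟩
  | cons x t ih =>
    intro h hh
    obtain ⟨ih1, ih2⟩ := ih (heappushA h x) (push_heap h x hh)
    refine ⟨ih1, ?_⟩
    simp only [List.foldl_cons, List.cons_append]
    exact (ih2.trans (List.Perm.append_left t (push_perm h x))).trans List.perm_middle

theorem range_map_getD (arr : List Int) :
    ∀ K : Nat, K ≤ arr.length →
    (PySem.List.pyRange 0 (K : Int) 1).map (fun i => PySem.List.pyGetD arr i 0) = arr.take K := by
  intro K
  induction K with
  | zero => intro _; simp [PySem.List.pyRange_one_eq_nil]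
  | succ m ih =>
    intro hle
    have hcast : ((m + 1 : Nat) : Int) = (m : Int) + 1 := by push_cast; ring
    rw [hcast, PySem.List.pyRange_one_succ_right (by positivity)]
    rw [List.map_append, ih (by omega)]
    have hm : m < arr.length := by omega
    simp only [List.map_cons, List.map_nil]
    rw [List.take_add_one, List.getElem?_eq_getElem hm]
    simp only [PySem.List.pyGetD_natCast]
    rw [getD_eq_getElem' _ _ hm]
    rfl

-- the main loop -------------------------------------------------------------

theorem loopEq (arr : List Int) (k n : Int) (hk1 : 1 ≤ k) (hk2 : k ≤ (arr.length : Int))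
    (hn : n ≤ (arr.length : Int)) :
    ∀ (c : Nat) (m : Int), (n - m).toNat = c → k ≤ m → m ≤ (arr.length : Int) →
    ∀ (heap : List Int) (ans : List Int),
      IsHeap heap → heap.Perm ((sortId (arr.take m.toNat)).drop (m.toNat - k.toNat)) →
      ((PySem.List.pyRange m n 1).foldl
          (fun (st : List Int × List Int) i =>
            let r := heappushpopA st.1 (PySem.List.pyGetD arr i 0)
            (r.1, st.2 ++ [PySem.List.pyGetD r.1 0 0])) (heap, ans)).2
      = ((PySem.List.pyRange m n 1).foldl
          (fun (st : List Int × List Int) i =>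
            let s' := insSortedB st.1 (PySem.List.pyGetD arr i 0)
            (s', st.2 ++ [PySem.List.pyGetD s' ((s'.length : Int) - k) 0]))
          (sortId (arr.take m.toNat), ans)).2 := by
  intro c
  induction c with
  | zero =>
    intro m hc hkm hml heap ans hH hP
    rw [PySem.List.pyRange_one_eq_nil (by omega)]
    rfl
  | succ c ih =>
    intro m hc hkm hml heap ans hH hP
    by_cases hmn : m < n
    case neg => rw [PySem.List.pyRange_one_eq_nil (by omega)]; rfl
    case pos =>
    rw [PySem.List.pyRange_one_cons hmn]
    simp only [List.foldl_cons]
    have hm0 : 0 ≤ m := by omega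
    set M := m.toNat with hM
    have hmM : (M : Int) = m := Int.toNat_of_nonneg hm0
    set K := k.toNat with hK
    have hkK : (K : Int) = k := Int.toNat_of_nonneg (by omega)
    have hMlt : M < arr.length := by omega
    have hKM : K ≤ M := by omega
    have hK1 : 1 ≤ K := by omega
    set s := sortId (arr.take M) with hsdef
    have hs_sorted : SortedLe s := by
      have := PySem.List.sorted_pairwise (arr.take M) (fun x => x)
      simpa [SortedLe, sortId] using this
    have hslen : s.length = M := by
      rw [hsdef]; unfold sortId
      rw [PySem.List.length_sorted, List.length_take]
      omega
    have hs_perm : s.Perm (arr.take M) := by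
      rw [hsdef]; exact PySem.List.sorted_perm ..
    set x := PySem.List.pyGetD arr m 0 with hx
    have hxval : x = arr.getD M 0 := by rw [hx, ← hmM, PySem.List.pyGetD_natCast]
    set j := M - K with hj
    have hjlt : j < M := by omega
    have hlenheap : heap.length = K := by
      have h1 := hP.length_eq
      rw [List.length_drop, hslen] at h1
      omega
    have hheapne : heap ≠ [] := by
      intro h0
      rw [h0] at hlenheap
      simp at hlenheap
      omega
    have hhead : heap.getD 0 0 = s.getD j 0 :=
      heap_head_eq heap s j hH hP hs_sorted (by omega)
    set s' := insSortedB s x with hs'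
    have hs'_sorted : SortedLe s' := ins_sorted s x hs_sorted
    have hs'_len : s'.length = M + 1 := by rw [hs', ins_length]; omega
    have hs'_eq : s' = sortId (arr.take (M + 1)) := by
      symm
      apply PySem.List.sorted_id_eq_of_perm_of_pairwise
      · have htake : arr.take (M + 1) = arr.take M ++ [arr.getD M 0] := by
          rw [List.take_add_one, List.getElem?_eq_getElem hMlt]
          rw [getD_eq_getElem' _ _ hMlt]
          rfl
        rw [htake, ← hxval]
        have p1 : s'.Perm (x :: s) := ins_perm s x
        have p2 : (x :: s).Perm (x :: arr.take M) := hs_perm.cons x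
        have p3 : (arr.take M ++ [x]).Perm (x :: arr.take M) := List.perm_append_singleton x _
        exact (p1.trans p2).trans p3.symm
      · exact hs'_sorted
    set hp := heappushpopA heap x with hhp
    have hH' : IsHeap hp.1 := pushpop_heap heap x hH
    have hdrop := step_drop_perm s x j hs_sorted (by omega)
    have hperm' : hp.1.Perm (s'.drop (j + 1)) := by
      rw [hhp]; unfold heappushpopA
      by_cases hcond : heap.getD 0 0 < x
      · rw [if_pos ⟨hheapne, hcond⟩]
        dsimp only
        have hsu := su_perm 0 (heap.set 0 x) x 0 (by simp; omega)
        rw [List.set_set] at hsu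
        have hcons : heap = heap.getD 0 0 :: heap.tail := by
          cases heap with
          | nil => exact absurd rfl hheapne
          | cons a t => rfl
        have htail : heap.tail.Perm (s.drop (j + 1)) := by
          have h2 : (heap.getD 0 0 :: heap.tail).Perm (s.getD j 0 :: s.drop (j + 1)) := by
            rw [← hcons, ← drop_getD_cons s j (by omega)]
            exact hP
          rw [hhead] at h2
          exact h2.cons_inv
        refine hsu.trans ?_
        have hset : heap.set 0 x = x :: heap.tail := by
          conv_lhs => rw [hcons]
          rfl
        rw [hset]
        refine (htail.cons x).trans ?_
        have h3 := hdrop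
        rw [if_pos (by rw [← hhead]; exact hcond)] at h3
        exact h3.symm
      · rw [if_neg (by intro hcon; exact hcond hcon.2)]
        dsimp only
        refine hP.trans ?_
        have h3 := hdrop
        rw [if_neg (by rw [← hhead]; exact hcond)] at h3
        exact h3.symm
    have hval' : hp.1.getD 0 0 = s'.getD (j + 1) 0 :=
      heap_head_eq hp.1 s' (j + 1) hH' hperm' hs'_sorted (by rw [hs'_len]; omega)
    have hBidx : PySem.List.pyGetD s' ((s'.length : Int) - k) 0 = s'.getD (j + 1) 0 := by
      have hidx : ((s'.length : Int)) - k = ((j + 1 : Nat) : Int) := by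
        rw [hs'_len]; push_cast; omega
      rw [hidx, PySem.List.pyGetD_natCast]
    have hA0 : PySem.List.pyGetD hp.1 0 0 = hp.1.getD 0 0 := PySem.List.pyGetD_zero ..
    have hansEq : ans ++ [PySem.List.pyGetD hp.1 0 0]
        = ans ++ [PySem.List.pyGetD s' ((s'.length : Int) - k) 0] := by
      rw [hA0, hval', hBidx]
    rw [hansEq]
    have hM1 : (m + 1).toNat = M + 1 := by omega
    have hinv : hp.1.Perm ((sortId (arr.take (m + 1).toNat)).drop ((m + 1).toNat - K)) := by
      rw [hM1, ← hs'_eq]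
      have : M + 1 - K = j + 1 := by omega
      rw [this]
      exact hperm'
    have hgoal := ih (m + 1) (by omega) (by omega) (by omega) hp.1
      (ans ++ [PySem.List.pyGetD s' ((s'.length : Int) - k) 0]) hH' hinv
    rw [hM1, ← hs'_eq] at hgoal
    exact hgoal

-- ===== VERDICT (by name: the statement is the Claim_ definition above) =====
theorem find_spec : Claim_equal_find := by
  unfold Claim_equal_find Spec_find
  intro n k arr _hdom hpre
  obtain ⟨hk1, hk2, hn⟩ := hpre
  set K := k.toNat with hK
  have hkK : (K : Int) = k := Int.toNat_of_nonneg (by omega)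
  have hKlen : K ≤ arr.length := by omega
  have hK1 : 1 ≤ K := by omega
  have hheapnil : IsHeap ([] : List Int) := by
    intro p hp0 hpl; simp at hpl
  obtain ⟨hH0, hP0⟩ := pushfold (arr.take K) [] hheapnil
  rw [List.append_nil] at hP0
  simp only [find, find_alt]
  have hfold : ((PySem.List.pyRange 0 k 1).foldl
      (fun h i => heappushA h (PySem.List.pyGetD arr i 0)) ([] : List Int))
      = (arr.take K).foldl heappushA [] := by
    conv_rhs => rw [← range_map_getD arr K hKlen]
    rw [List.foldl_map, ← hkK]
  have hslice : PySem.List.slice arr (some 0) (some k) = arr.take K := by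
    rw [PySem.List.slice_zero_start, PySem.List.slice_to arr (by omega)]
  rw [hfold, hslice]
  set heap0 := (arr.take K).foldl heappushA [] with hh0
  have hperm0 : heap0.Perm (sortId (arr.take K)) :=
    hP0.trans (PySem.List.sorted_perm ..).symm
  have hs0len : (sortId (arr.take K)).length = K := by
    unfold sortId
    rw [PySem.List.length_sorted, List.length_take]
    omega
  have hs0sorted : SortedLe (sortId (arr.take K)) := by
    have := PySem.List.sorted_pairwise (arr.take K) (fun x => x)
    simpa [SortedLe, sortId] using this
  have hhead0 : heap0.getD 0 0 = (sortId (arr.take K)).getD 0 0 := by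
    apply heap_head_eq heap0 (sortId (arr.take K)) 0 hH0 ?_ hs0sorted (by omega)
    simpa using hperm0
  have hval0 : PySem.List.pyGetD heap0 0 0
      = PySem.List.pyGetD (sortId (arr.take K)) (((sortId (arr.take K)).length : Int) - k) 0 := by
    rw [hs0len, (show (K : Int) - k = ((0 : Nat) : Int) by omega), PySem.List.pyGetD_natCast]
    rw [PySem.List.pyGetD_zero]
    exact hhead0
  have hgoal := loopEq arr k n hk1 hk2 hn ((n - k).toNat) k rfl (le_refl k) hk2 heap0
    [PySem.List.pyGetD (sortId (arr.take K)) (((sortId (arr.take K)).length : Int) - k) 0]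
    hH0 (by simpa using hperm0)
  rw [hval0]
  exact hgoal
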